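-- pv_equiv track=rewrite | github.com/robpickup89-stack/XKOP_UG405 | test_crc.py | crc_check_full_packet
-- ===== SOURCE A (Python) =====
-- CRC_TABLE = [
--     0x0000, 0x0f89, 0x1f12, 0x109b, 0x3e24, 0x31ad, 0x2136, 0x2ebf,
--     0x7c48, 0x73c1, 0x635a, 0x6cd3, 0x426c, 0x4de5, 0x5d7e, 0x52f7,
--     0xf081, 0xff08, 0xef93, 0xe01a, 0xcea5, 0xc12c, 0xd1b7, 0xde3e,
--     0x8cc9, 0x8340, 0x93db, 0x9c52, 0xb2ed, 0xbd64, 0xadff, 0xa276,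
--     0xe102, 0xee8b, 0xfe10, 0xf199, 0xdf26, 0xd0af, 0xc034, 0xcfbd,
--     0x9d4a, 0x92c3, 0x8258, 0x8dd1, 0xa36e, 0xace7, 0xbc7c, 0xb3f5,
--     0x1183, 0x1e0a, 0x0e91, 0x0118, 0x2fa7, 0x202e, 0x30b5, 0x3f3c,
--     0x6dcb, 0x6242, 0x72d9, 0x7d50, 0x53ef, 0x5c66, 0x4cfd, 0x4374,
--     0xc204, 0xcd8d, 0xdd16, 0xd29f, 0xfc20, 0xf3a9, 0xe332, 0xecbb,
--     0xbe4c, 0xb1c5, 0xa15e, 0xaed7, 0x8068, 0x8fe1, 0x9f7a, 0x90f3,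
--     0x3285, 0x3d0c, 0x2d97, 0x221e, 0x0ca1, 0x0328, 0x13b3, 0x1c3a,
--     0x4ecd, 0x4144, 0x51df, 0x5e56, 0x70e9, 0x7f60, 0x6ffb, 0x6072,
--     0x2306, 0x2c8f, 0x3c14, 0x339d, 0x1d22, 0x12ab, 0x0230, 0x0db9,
--     0x5f4e, 0x50c7, 0x405c, 0x4fd5, 0x616a, 0x6ee3, 0x7e78, 0x71f1,
--     0xd387, 0xdc0e, 0xcc95, 0xc31c, 0xeda3, 0xe22a, 0xf2b1, 0xfd38,
--     0xafcf, 0xa046, 0xb0dd, 0xbf54, 0x91eb, 0x9e62, 0x8ef9, 0x8170,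
--     0x8408, 0x8b81, 0x9b1a, 0x9493, 0xba2c, 0xb5a5, 0xa53e, 0xaab7,
--     0xf840, 0xf7c9, 0xe752, 0xe8db, 0xc664, 0xc9ed, 0xd976, 0xd6ff,
--     0x7489, 0x7b00, 0x6b9b, 0x6412, 0x4aad, 0x4524, 0x55bf, 0x5a36,
--     0x08c1, 0x0748, 0x17d3, 0x185a, 0x36e5, 0x396c, 0x29f7, 0x267e,
--     0x650a, 0x6a83, 0x7a18, 0x7591, 0x5b2e, 0x54a7, 0x443c, 0x4bb5,
--     0x1942, 0x16cb, 0x0650, 0x09d9, 0x2766, 0x28ef, 0x3874, 0x37fd,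
--     0x958b, 0x9a02, 0x8a99, 0x8510, 0xabaf, 0xa426, 0xb4bd, 0xbb34,
--     0xe9c3, 0xe64a, 0xf6d1, 0xf958, 0xd7e7, 0xd86e, 0xc8f5, 0xc77c,
--     0x460c, 0x4985, 0x591e, 0x5697, 0x7828, 0x77a1, 0x673a, 0x68b3,
--     0x3a44, 0x35cd, 0x2556, 0x2adf, 0x0460, 0x0be9, 0x1b72, 0x14fb,
--     0xb68d, 0xb904, 0xa99f, 0xa616, 0x88a9, 0x8720, 0x97bb, 0x9832,
--     0xcac5, 0xc54c, 0xd5d7, 0xda5e, 0xf4e1, 0xfb68, 0xebf3, 0xe47a,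
--     0xa70e, 0xa887, 0xb81c, 0xb795, 0x992a, 0x96a3, 0x8638, 0x89b1,
--     0xdb46, 0xd4cf, 0xc454, 0xcbdd, 0xe562, 0xeaeb, 0xfa70, 0xf5f9,
--     0x578f, 0x5806, 0x489d, 0x4714, 0x69ab, 0x6622, 0x76b9, 0x7930,
--     0x2bc7, 0x244e, 0x34d5, 0x3b5c, 0x15e3, 0x1a6a, 0x0af1, 0x0578,
-- ]
--
-- def crc_check_full_packet(packet: bytes) -> bool:
--     """Check if CRC is valid by processing full packet"""
--     crc1 = 0
--     crc0 = 0
--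
--     for byte_val in packet:
--         temp = (crc1 ^ byte_val) & 0xFF
--         crc1 = (crc0 ^ CRC_TABLE[temp]) & 0xFF
--         crc0 = (CRC_TABLE[temp] >> 8) & 0xFF
--
--     return (crc1 == 0) and (crc0 == 0)
-- ===== SOURCE B (Python) =====
-- # The 256-entry table is GF(2)-linear in its index; these are its 8 generator
-- # rows (table[1<<k]).  Each byte is folded in bit-by-bit from these 8 constants,
-- # with a single 16-bit crc register instead of two byte registers.
-- CRC_BASIS = (0x0F89, 0x1F12, 0x3E24, 0x7C48, 0xF081, 0xE102, 0xC204, 0x8408)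
--
-- def crc_check_full_packet(packet: bytes) -> bool:
--     """Check if CRC is valid by processing full packet"""
--     crc = 0
--     for byte_val in packet:
--         t = (crc ^ byte_val) & 0xFF
--         crc >>= 8
--         for k in range(8):
--             if (t >> k) & 1:
--                 crc ^= CRC_BASIS[k]
--     return crc == 0
-- ===== Notes on version B (the rewrite author's own statement) =====
-- stated objective: alternative
-- what changed: B discards the 256-entry lookup table, exploiting that it is GF(2)-linear in its index: each byte is folded in bit-by-bit from the table's 8 generator rows over a single 16-bit crc register, instead of A's per-byte whole-table lookup with the state split across two 8-bit registers.
import Mathlib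
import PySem

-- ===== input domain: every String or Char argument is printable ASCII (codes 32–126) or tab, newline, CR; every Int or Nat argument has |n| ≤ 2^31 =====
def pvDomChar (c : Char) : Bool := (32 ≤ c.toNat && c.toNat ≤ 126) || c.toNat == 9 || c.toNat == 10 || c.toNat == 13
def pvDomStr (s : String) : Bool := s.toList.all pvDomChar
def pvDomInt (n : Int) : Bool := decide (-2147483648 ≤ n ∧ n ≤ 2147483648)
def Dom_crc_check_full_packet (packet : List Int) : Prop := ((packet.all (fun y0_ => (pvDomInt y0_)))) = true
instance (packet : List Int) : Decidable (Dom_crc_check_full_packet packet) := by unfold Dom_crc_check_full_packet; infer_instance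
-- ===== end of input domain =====

-- B replaces the 256-entry lookup table by its 8 generator rows (the table is
-- GF(2)-linear in its index), folding each byte in bit-by-bit over a single
-- 16-bit register instead of two byte registers; objective: alternative
-- (different algorithm, same cost class), same result on every input.

-- ===== PORT A =====
def pvCrcTable : List Int := [
  0x0000, 0x0f89, 0x1f12, 0x109b, 0x3e24, 0x31ad, 0x2136, 0x2ebf,
  0x7c48, 0x73c1, 0x635a, 0x6cd3, 0x426c, 0x4de5, 0x5d7e, 0x52f7,
  0xf081, 0xff08, 0xef93, 0xe01a, 0xcea5, 0xc12c, 0xd1b7, 0xde3e,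
  0x8cc9, 0x8340, 0x93db, 0x9c52, 0xb2ed, 0xbd64, 0xadff, 0xa276,
  0xe102, 0xee8b, 0xfe10, 0xf199, 0xdf26, 0xd0af, 0xc034, 0xcfbd,
  0x9d4a, 0x92c3, 0x8258, 0x8dd1, 0xa36e, 0xace7, 0xbc7c, 0xb3f5,
  0x1183, 0x1e0a, 0x0e91, 0x0118, 0x2fa7, 0x202e, 0x30b5, 0x3f3c,
  0x6dcb, 0x6242, 0x72d9, 0x7d50, 0x53ef, 0x5c66, 0x4cfd, 0x4374,
  0xc204, 0xcd8d, 0xdd16, 0xd29f, 0xfc20, 0xf3a9, 0xe332, 0xecbb,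
  0xbe4c, 0xb1c5, 0xa15e, 0xaed7, 0x8068, 0x8fe1, 0x9f7a, 0x90f3,
  0x3285, 0x3d0c, 0x2d97, 0x221e, 0x0ca1, 0x0328, 0x13b3, 0x1c3a,
  0x4ecd, 0x4144, 0x51df, 0x5e56, 0x70e9, 0x7f60, 0x6ffb, 0x6072,
  0x2306, 0x2c8f, 0x3c14, 0x339d, 0x1d22, 0x12ab, 0x0230, 0x0db9,
  0x5f4e, 0x50c7, 0x405c, 0x4fd5, 0x616a, 0x6ee3, 0x7e78, 0x71f1,
  0xd387, 0xdc0e, 0xcc95, 0xc31c, 0xeda3, 0xe22a, 0xf2b1, 0xfd38,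
  0xafcf, 0xa046, 0xb0dd, 0xbf54, 0x91eb, 0x9e62, 0x8ef9, 0x8170,
  0x8408, 0x8b81, 0x9b1a, 0x9493, 0xba2c, 0xb5a5, 0xa53e, 0xaab7,
  0xf840, 0xf7c9, 0xe752, 0xe8db, 0xc664, 0xc9ed, 0xd976, 0xd6ff,
  0x7489, 0x7b00, 0x6b9b, 0x6412, 0x4aad, 0x4524, 0x55bf, 0x5a36,
  0x08c1, 0x0748, 0x17d3, 0x185a, 0x36e5, 0x396c, 0x29f7, 0x267e,
  0x650a, 0x6a83, 0x7a18, 0x7591, 0x5b2e, 0x54a7, 0x443c, 0x4bb5,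
  0x1942, 0x16cb, 0x0650, 0x09d9, 0x2766, 0x28ef, 0x3874, 0x37fd,
  0x958b, 0x9a02, 0x8a99, 0x8510, 0xabaf, 0xa426, 0xb4bd, 0xbb34,
  0xe9c3, 0xe64a, 0xf6d1, 0xf958, 0xd7e7, 0xd86e, 0xc8f5, 0xc77c,
  0x460c, 0x4985, 0x591e, 0x5697, 0x7828, 0x77a1, 0x673a, 0x68b3,
  0x3a44, 0x35cd, 0x2556, 0x2adf, 0x0460, 0x0be9, 0x1b72, 0x14fb,
  0xb68d, 0xb904, 0xa99f, 0xa616, 0x88a9, 0x8720, 0x97bb, 0x9832,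
  0xcac5, 0xc54c, 0xd5d7, 0xda5e, 0xf4e1, 0xfb68, 0xebf3, 0xe47a,
  0xa70e, 0xa887, 0xb81c, 0xb795, 0x992a, 0x96a3, 0x8638, 0x89b1,
  0xdb46, 0xd4cf, 0xc454, 0xcbdd, 0xe562, 0xeaeb, 0xfa70, 0xf5f9,
  0x578f, 0x5806, 0x489d, 0x4714, 0x69ab, 0x6622, 0x76b9, 0x7930,
  0x2bc7, 0x244e, 0x34d5, 0x3b5c, 0x15e3, 0x1a6a, 0x0af1, 0x0578]

-- one step of A's for-loop; state p = (crc0, crc1)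
def pvStepA (p : Int × Int) (byte_val : Int) : Int × Int :=
  let temp := PySem.Int.band (PySem.Int.bxor p.2 byte_val) 0xFF
  -- temp is always in [0, 255] and the table has 256 entries, so Python's
  -- CRC_TABLE[temp] never raises; the .getD 0 default is never taken
  let tv := (PySem.List.pyGet? pvCrcTable temp).getD 0
  (PySem.Int.band (tv >>> (8 : Nat)) 0xFF, PySem.Int.band (PySem.Int.bxor p.1 tv) 0xFF)

def crc_check_full_packet (packet : List Int) : Bool :=
  let s := packet.foldl pvStepA (0, 0)
  decide (s.2 = 0) && decide (s.1 = 0)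

-- ===== PORT B =====
def pvCrcBasis : List Int := [0x0F89, 0x1F12, 0x3E24, 0x7C48, 0xF081, 0xE102, 0xC204, 0x8408]

-- one step of B's for-loop: fold one byte in, bit by bit, from the 8 basis rows
def pvStepB (crc : Int) (byte_val : Int) : Int :=
  let t := PySem.Int.band (PySem.Int.bxor crc byte_val) 0xFF
  let crc := crc >>> (8 : Nat)
  (List.range 8).foldl (fun (c : Int) (k : Nat) =>
    if PySem.Int.band (t >>> k) 1 ≠ 0 then
      PySem.Int.bxor c ((PySem.List.pyGet? pvCrcBasis (k : Int)).getD 0)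
    else c) crc

def crc_check_full_packet_alt (packet : List Int) : Bool :=
  decide (packet.foldl pvStepB 0 = 0)

-- ===== PRECONDITION & SPEC =====
def Spec_crc_check_full_packet (packet : List Int) (out : Bool) : Prop := out = crc_check_full_packet_alt packet
instance (packet : List Int) (out : Bool) : Decidable (Spec_crc_check_full_packet packet out) := by unfold Spec_crc_check_full_packet; infer_instance

-- ===== CLAIM (what is proved, stated in full; the proofs are below) =====
def Claim_equal_crc_check_full_packet : Prop := ∀ (packet : List Int), Dom_crc_check_full_packet packet → Spec_crc_check_full_packet packet (crc_check_full_packet packet)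

-- ===== LEMMAS AND PROOFS =====

-- table lookup as a function (proof-side abbreviation)
def pvTv (t : Int) : Int := (PySem.List.pyGet? pvCrcTable t).getD 0

-- B's inner bit loop as a function of the byte t and the start register c
def pvInner (t : Int) (c : Int) : Int :=
  (List.range 8).foldl (fun (c : Int) (k : Nat) =>
    if PySem.Int.band (t >>> k) 1 ≠ 0 then
      PySem.Int.bxor c ((PySem.List.pyGet? pvCrcBasis (k : Int)).getD 0)
    else c) c

theorem pvStepB_eq_inner (crc y : Int) :
    pvStepB crc y = pvInner (PySem.Int.band (PySem.Int.bxor crc y) 0xFF) (crc >>> (8 : Nat)) := rfl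

theorem nat_and255 (x : Nat) : x &&& 255 = x % 256 := by
  have := Nat.and_two_pow_sub_one_eq_mod x 8
  norm_num at this; exact this

theorem nat_and255_lt (x : Nat) : x &&& 255 < 256 := by
  rw [nat_and255]; exact Nat.mod_lt _ (by norm_num)

theorem nat_xor8_lt (a b : Nat) (ha : a < 256) (hb : b < 256) : a ^^^ b < 256 := by
  have hp : (2:Nat)^8 = 256 := by norm_num
  have h := Nat.xor_lt_two_pow (x:=a) (y:=b) (n:=8) (by omega) (by omega)
  omega

set_option maxRecDepth 100000 in
theorem pv_sub_xor_255 : ∀ x : Fin 256, 255 - x.val = 255 ^^^ x.val := by decide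

theorem nat_sub_xor (x : Nat) (h : x < 256) : 255 - x = 255 ^^^ x := pv_sub_xor_255 ⟨x, h⟩

theorem pv_band255_bounds (a : Int) : 0 ≤ PySem.Int.band a 255 ∧ PySem.Int.band a 255 < 256 := by
  unfold PySem.Int.band
  by_cases h : 0 ≤ a
  · rw [if_pos h, if_pos (by norm_num : (0:Int) ≤ 255),
      show Int.toNat 255 = 255 from rfl, nat_and255]
    have := Nat.mod_lt a.toNat (y := 256) (by norm_num)
    exact ⟨by positivity, by exact_mod_cast this⟩
  · rw [if_neg h, if_pos (by norm_num : (0:Int) ≤ 255),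
      show Int.toNat 255 = 255 from rfl]
    have h1 : (255:Nat) - (255 &&& (-a-1).toNat) ≤ 255 := Nat.sub_le _ _
    exact ⟨by positivity, by exact_mod_cast Nat.lt_succ_of_le h1⟩

theorem pv_band255_low (c0 c1 : Int) (h0 : 0 ≤ c0) (h1 : 0 ≤ c1) (h1' : c1 < 256) :
    PySem.Int.band (c0 * 256 + c1) 255 = c1 := by
  rw [PySem.Int.band_of_nonneg (by omega) (by norm_num : (0:Int) ≤ 255),
    show Int.toNat 255 = 255 from rfl, nat_and255]
  omega

theorem pv_band255_id (c1 : Int) (h1 : 0 ≤ c1) (h1' : c1 < 256) :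
    PySem.Int.band c1 255 = c1 := by
  have := pv_band255_low 0 c1 le_rfl h1 h1'
  rwa [show (0:Int) * 256 + c1 = c1 from by ring] at this

theorem pv_shift8_high (c0 c1 : Int) (h0 : 0 ≤ c0) (h1 : 0 ≤ c1) (h1' : c1 < 256) :
    (c0 * 256 + c1) >>> (8 : Nat) = c0 := by
  rw [show c0*256+c1 = ((c0*256+c1).toNat : Int) from by omega, ← Int.natCast_shiftRight,
    Nat.shiftRight_eq_div_pow]
  have hp : (2:Nat)^8 = 256 := by norm_num
  omega

theorem pv_band255_dist (x y : Int) (hx : 0 ≤ x) :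
    PySem.Int.band (PySem.Int.bxor x y) 255 =
      PySem.Int.bxor (PySem.Int.band x 255) (PySem.Int.band y 255) := by
  by_cases hy : 0 ≤ y
  · rw [PySem.Int.bxor_of_nonneg hx hy,
      PySem.Int.band_of_nonneg (by positivity) (by norm_num : (0:Int) ≤ 255),
      PySem.Int.band_of_nonneg hx (by norm_num : (0:Int) ≤ 255),
      PySem.Int.band_of_nonneg hy (by norm_num : (0:Int) ≤ 255),
      PySem.Int.bxor_natCast]
    rw [show Int.toNat 255 = 255 from rfl, Int.toNat_natCast, Nat.and_xor_distrib_right]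
  · have hm : y = -((-y-1).toNat : Int) - 1 := by omega
    set m : Nat := (-y-1).toNat with hmdef
    have hbx : PySem.Int.bxor x y = -((x.toNat ^^^ m : Nat) : Int) - 1 := by
      unfold PySem.Int.bxor
      rw [if_pos hx, if_neg (by omega : ¬ (0:Int) ≤ y)]
    have hbneg : ¬ (0 : Int) ≤ -((x.toNat ^^^ m : Nat) : Int) - 1 := by
      have : (0:Int) ≤ ((x.toNat ^^^ m : Nat) : Int) := by positivity
      omega
    have hband : ∀ z : Int, ¬ 0 ≤ z → PySem.Int.band z 255 = ((255 - (255 &&& (-z-1).toNat) : Nat) : Int) := by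
      intro z hz
      unfold PySem.Int.band
      rw [if_neg hz, if_pos (by norm_num : (0:Int) ≤ 255), show Int.toNat 255 = 255 from rfl]
    rw [hbx, hband _ hbneg, hband y (by omega),
      PySem.Int.band_of_nonneg hx (by norm_num : (0:Int) ≤ 255),
      show Int.toNat 255 = 255 from rfl]
    have harg : (-(-((x.toNat ^^^ m : Nat) : Int) - 1) - 1).toNat = x.toNat ^^^ m := by omega
    rw [harg, ← hmdef, PySem.Int.bxor_natCast]
    congr 1
    rw [Nat.and_comm 255 (x.toNat ^^^ m), Nat.and_comm 255 m, Nat.and_xor_distrib_right]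
    have l1 : x.toNat &&& 255 ^^^ m &&& 255 < 256 :=
      nat_xor8_lt _ _ (nat_and255_lt _) (nat_and255_lt _)
    rw [nat_sub_xor _ l1, nat_sub_xor _ (nat_and255_lt m)]
    rw [← Nat.xor_assoc, Nat.xor_comm 255 (x.toNat &&& 255), Nat.xor_assoc]

theorem pv_basis_nonneg (k : Nat) : 0 ≤ (PySem.List.pyGet? pvCrcBasis (k : Int)).getD 0 := by
  rw [PySem.List.pyGet?_natCast]
  match k with
  | 0 | 1 | 2 | 3 | 4 | 5 | 6 | 7 => decide
  | n+8 =>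
    have : pvCrcBasis[n+8]? = none := by
      apply List.getElem?_eq_none; simp [pvCrcBasis]
    rw [this]; decide

theorem pv_bxor_nonneg (x y : Int) (hx : 0 ≤ x) (hy : 0 ≤ y) : 0 ≤ PySem.Int.bxor x y := by
  rw [PySem.Int.bxor_of_nonneg hx hy]; positivity

theorem pv_bxor_assoc (a b c : Int) (ha : 0 ≤ a) (hb : 0 ≤ b) (hc : 0 ≤ c) :
    PySem.Int.bxor (PySem.Int.bxor a b) c = PySem.Int.bxor a (PySem.Int.bxor b c) := by
  rw [show a = (a.toNat : Int) from by omega, show b = (b.toNat : Int) from by omega,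
    show c = (c.toNat : Int) from by omega]
  simp only [PySem.Int.bxor_natCast, Nat.xor_assoc]

theorem pv_fold_shift (t c : Int) (hc : 0 ≤ c) : ∀ (ks : List Nat) (x : Int), 0 ≤ x →
    ks.foldl (fun (a : Int) (k : Nat) =>
      if PySem.Int.band (t >>> k) 1 ≠ 0 then
        PySem.Int.bxor a ((PySem.List.pyGet? pvCrcBasis (k : Int)).getD 0)
      else a) (PySem.Int.bxor c x) =
    PySem.Int.bxor c (ks.foldl (fun (a : Int) (k : Nat) =>
      if PySem.Int.band (t >>> k) 1 ≠ 0 then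
        PySem.Int.bxor a ((PySem.List.pyGet? pvCrcBasis (k : Int)).getD 0)
      else a) x)
  | [], x, hx => rfl
  | k :: ks, x, hx => by
    rw [List.foldl_cons, List.foldl_cons]
    by_cases h : PySem.Int.band (t >>> k) 1 ≠ 0
    · rw [if_pos h, if_pos h, pv_bxor_assoc c x _ hc hx (pv_basis_nonneg k)]
      exact pv_fold_shift t c hc ks _ (pv_bxor_nonneg _ _ hx (pv_basis_nonneg k))
    · rw [if_neg h, if_neg h]
      exact pv_fold_shift t c hc ks x hx

theorem pv_inner_shift (t c x : Int) (hc : 0 ≤ c) (hx : 0 ≤ x) :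
    pvInner t (PySem.Int.bxor c x) = PySem.Int.bxor c (pvInner t x) := by
  unfold pvInner
  exact pv_fold_shift t c hc (List.range 8) x hx

set_option maxRecDepth 100000 in
theorem pv_inner_table : ∀ t : Fin 256,
    pvInner (t.val : Int) 0 = pvTv (t.val : Int) ∧
      0 ≤ pvTv (t.val : Int) ∧ pvTv (t.val : Int) < 65536 := by decide

theorem pv_recomb (c0 X : Int) (h0 : 0 ≤ c0) (h0' : c0 < 256) (hX : 0 ≤ X) (hX' : X < 65536) :
    PySem.Int.bxor c0 X =
      PySem.Int.band (X >>> (8 : Nat)) 255 * 256 + PySem.Int.band (PySem.Int.bxor c0 X) 255 := by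
  rw [show X = ((X.toNat : Nat) : Int) from by omega, ← Int.natCast_shiftRight,
    PySem.Int.bxor_of_nonneg h0 (by positivity : (0:Int) ≤ ((X.toNat : Nat) : Int)),
    PySem.Int.band_of_nonneg (by positivity) (by norm_num : (0:Int) ≤ 255),
    PySem.Int.band_of_nonneg (by positivity) (by norm_num : (0:Int) ≤ 255),
    show Int.toNat 255 = 255 from rfl]
  simp only [Int.toNat_natCast, Nat.shiftRight_eq_div_pow, nat_and255]
  have hp : (2:Nat)^8 = 256 := by norm_num
  have hY : c0.toNat ^^^ X.toNat < 65536 := by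
    have hq : (2:Nat)^16 = 65536 := by norm_num
    have := Nat.xor_lt_two_pow (x := c0.toNat) (y := X.toNat) (n := 16) (by omega) (by omega)
    omega
  have hdiv : (c0.toNat ^^^ X.toNat) / 256 = X.toNat / 256 := by
    have h1 := Nat.shiftRight_xor_distrib (a := c0.toNat) (b := X.toNat) (i := 8)
    simp only [Nat.shiftRight_eq_div_pow] at h1
    have hc0 : c0.toNat / 2^8 = 0 := by omega
    rw [hc0, Nat.zero_xor] at h1
    omega
  omega

theorem pv_stepA_bounds (p : Int × Int) (y : Int) :
    0 ≤ (pvStepA p y).1 ∧ (pvStepA p y).1 < 256 ∧ 0 ≤ (pvStepA p y).2 ∧ (pvStepA p y).2 < 256 := by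
  simp only [pvStepA]
  exact ⟨(pv_band255_bounds _).1, (pv_band255_bounds _).2,
    (pv_band255_bounds _).1, (pv_band255_bounds _).2⟩

theorem pv_step (c0 c1 y : Int) (h0 : 0 ≤ c0) (h0' : c0 < 256) (h1 : 0 ≤ c1) (h1' : c1 < 256) :
    pvStepB (c0 * 256 + c1) y = (pvStepA (c0, c1) y).1 * 256 + (pvStepA (c0, c1) y).2 := by
  have hm := pv_band255_bounds y
  set m : Int := PySem.Int.band y 255 with hmdef
  have htemp : PySem.Int.band (PySem.Int.bxor c1 y) 0xFF = PySem.Int.bxor c1 m := by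
    rw [show (0xFF : Int) = 255 from rfl, pv_band255_dist c1 y h1, pv_band255_id c1 h1 h1']
  set t : Int := PySem.Int.bxor c1 m with htdef
  have ht : 0 ≤ t := pv_bxor_nonneg _ _ h1 hm.1
  have ht' : t < 256 := by
    rw [htdef, PySem.Int.bxor_of_nonneg h1 hm.1]
    have := nat_xor8_lt c1.toNat m.toNat (by omega) (by omega)
    omega
  have htop : PySem.Int.band (PySem.Int.bxor (c0 * 256 + c1) y) 0xFF = t := by
    rw [show (0xFF : Int) = 255 from rfl, pv_band255_dist _ y (by omega),
      pv_band255_low c0 c1 h0 h1 h1', ← hmdef, htdef]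
  have htbl := pv_inner_table ⟨t.toNat, by omega⟩
  have hcast : ((t.toNat : Nat) : Int) = t := by omega
  rw [hcast] at htbl
  -- B side
  rw [pvStepB_eq_inner, htop, pv_shift8_high c0 c1 h0 h1 h1']
  have hshift : pvInner t c0 = PySem.Int.bxor c0 (pvInner t 0) := by
    have := pv_inner_shift t c0 0 h0 le_rfl
    rwa [PySem.Int.bxor_zero] at this
  rw [hshift, htbl.1]
  -- A side
  show _ = (let temp := PySem.Int.band (PySem.Int.bxor c1 y) 0xFF
            let tv := (PySem.List.pyGet? pvCrcTable temp).getD 0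
            (PySem.Int.band (tv >>> (8:Nat)) 0xFF, PySem.Int.band (PySem.Int.bxor c0 tv) 0xFF)).1 * 256 +
          (let temp := PySem.Int.band (PySem.Int.bxor c1 y) 0xFF
            let tv := (PySem.List.pyGet? pvCrcTable temp).getD 0
            (PySem.Int.band (tv >>> (8:Nat)) 0xFF, PySem.Int.band (PySem.Int.bxor c0 tv) 0xFF)).2
  simp only [htemp]
  show PySem.Int.bxor c0 (pvTv t) =
    PySem.Int.band (pvTv t >>> (8:Nat)) 0xFF * 256 + PySem.Int.band (PySem.Int.bxor c0 (pvTv t)) 0xFF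
  rw [show (0xFF : Int) = 255 from rfl]
  exact pv_recomb c0 (pvTv t) h0 h0' htbl.2.1 htbl.2.2

theorem pv_loop (l : List Int) : ∀ (c0 c1 : Int), 0 ≤ c0 → c0 < 256 → 0 ≤ c1 → c1 < 256 →
    l.foldl pvStepB (c0 * 256 + c1) =
      (l.foldl pvStepA (c0, c1)).1 * 256 + (l.foldl pvStepA (c0, c1)).2 ∧
    0 ≤ (l.foldl pvStepA (c0, c1)).1 ∧ (l.foldl pvStepA (c0, c1)).1 < 256 ∧
    0 ≤ (l.foldl pvStepA (c0, c1)).2 ∧ (l.foldl pvStepA (c0, c1)).2 < 256 := by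
  induction l with
  | nil => intro c0 c1 h0 h0' h1 h1'; exact ⟨rfl, h0, h0', h1, h1'⟩
  | cons y l ih =>
    intro c0 c1 h0 h0' h1 h1'
    rw [List.foldl_cons, List.foldl_cons, pv_step c0 c1 y h0 h0' h1 h1']
    obtain ⟨b0, b0', b1, b1'⟩ := pv_stepA_bounds (c0, c1) y
    have := ih (pvStepA (c0, c1) y).1 (pvStepA (c0, c1) y).2 b0 b0' b1 b1'
    rwa [Prod.mk.eta] at this

-- ===== VERDICT (by name: the statement is the Claim_ definition above) =====
theorem crc_check_full_packet_spec : Claim_equal_crc_check_full_packet := by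
  intro packet _
  unfold Spec_crc_check_full_packet crc_check_full_packet crc_check_full_packet_alt
  obtain ⟨heq, hb0, hb0', hb1, hb1'⟩ :=
    pv_loop packet 0 0 le_rfl (by norm_num) le_rfl (by norm_num)
  rw [show ((0 : Int) * 256 + 0 : Int) = 0 from by ring] at heq
  simp only [heq]
  rw [show (decide ((packet.foldl pvStepA (0, 0)).2 = 0) &&
        decide ((packet.foldl pvStepA (0, 0)).1 = 0)) =
      decide ((packet.foldl pvStepA (0, 0)).2 = 0 ∧ (packet.foldl pvStepA (0, 0)).1 = 0) from
    (Bool.decide_and _ _).symm]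
  rw [decide_eq_decide]
  omega
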